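-- pv_equiv track=rewrite | github.com/HeliMonttinen/tsm_micrornas | scripts/python/RNA_alignments.py | indexes_in_original_seq
-- ===== SOURCE A (Python) =====
-- def indexes_in_original_seq(aligned_indexes, aligned_seq):
--     """
--     Identifies the position of the loop in the original sequence.
--     Alignment should be in one line. without header.
--
--     Requires
--     ========
--
--     aligned_seq: Aligned sequence
--     aligned_loop_indexes: Loop indexes in the alignment
--
--     Returns
--     =======
--
--     Loop_indexes_original: Loop indexes in the original sequence
--
--     """
--
--     original_indexes = []
--
--     for index in aligned_indexes:
--
--         position_count = 0
--         new_index = index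
--
--         for position in aligned_seq:
--             if position == '-':
--                 new_index -= 1
--                 position_count += 1
--
--             else:
--                 position_count += 1
--
--             if position_count == index:
--                 original_indexes.append(new_index)
--                 break
--
--     return original_indexes
-- ===== SOURCE B (Python) =====
-- def indexes_in_original_seq(aligned_indexes, aligned_seq):
--     # Prefix gap counts: gaps[k] = number of '-' among the first k aligned chars.
--     gaps = [0]
--     for ch in aligned_seq:
--         gaps.append(gaps[-1] + (1 if ch == '-' else 0))
--     n = len(aligned_seq)
--     return [i - gaps[i] for i in aligned_indexes if 1 <= i <= n]
-- ===== Notes on version B (the rewrite author's own statement) =====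
-- stated objective: faster
-- what changed: Replaces the per-index rescan of the alignment with a prefix gap-count array built once, turning each lookup into O(1) arithmetic.
import Mathlib
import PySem

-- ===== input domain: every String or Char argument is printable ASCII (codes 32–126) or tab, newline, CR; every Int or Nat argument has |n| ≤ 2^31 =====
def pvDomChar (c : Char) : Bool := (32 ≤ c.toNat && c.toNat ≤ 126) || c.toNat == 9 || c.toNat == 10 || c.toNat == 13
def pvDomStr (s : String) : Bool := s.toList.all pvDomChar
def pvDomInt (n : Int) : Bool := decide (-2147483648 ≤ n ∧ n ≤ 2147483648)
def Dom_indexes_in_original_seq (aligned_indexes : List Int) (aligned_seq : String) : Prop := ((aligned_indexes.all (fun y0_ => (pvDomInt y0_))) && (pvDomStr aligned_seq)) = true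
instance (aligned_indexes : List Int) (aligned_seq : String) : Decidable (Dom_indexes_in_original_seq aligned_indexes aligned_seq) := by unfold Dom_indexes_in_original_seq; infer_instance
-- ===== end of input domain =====

-- B replaces A's per-index rescan of the alignment with a prefix gap-count array built once (faster, asymptotic).


-- ===== PORT A =====
-- inner 'for position in aligned_seq' loop with its break; state = (position_count, new_index);
-- returns some v when the break fires (value appended), none when the loop ends without a break
def pvAInner : List Char → Int → Int → Int → Option Int
  | [], _, _, _ => none
  | c :: rest, pc, ni, idx =>
    if pc + 1 = idx then some (if c = '-' then ni - 1 else ni)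
    else pvAInner rest (pc + 1) (if c = '-' then ni - 1 else ni) idx

def indexes_in_original_seq (aligned_indexes : List Int) (aligned_seq : String) : List Int :=
  aligned_indexes.foldl
    (fun original_indexes index =>
      match pvAInner aligned_seq.toList 0 index index with
      | some v => original_indexes ++ [v]
      | none => original_indexes)
    []

-- ===== PORT B =====
-- prefix gap counts (Python's accumulate-style loop ↔ List.scanl), then one O(1) lookup per query
def indexes_in_original_seq_alt (aligned_indexes : List Int) (aligned_seq : String) : List Int :=
  let cs := aligned_seq.toList
  let gaps := cs.scanl (fun g c => g + (if c = '-' then 1 else 0)) (0 : Int)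
  let n : Int := cs.length
  aligned_indexes.filterMap
    (fun i => if 1 ≤ i ∧ i ≤ n then some (i - gaps.getD i.toNat 0) else none)

-- ===== PRECONDITION & SPEC =====
def Spec_indexes_in_original_seq (aligned_indexes : List Int) (aligned_seq : String) (out : List Int) : Prop := out = indexes_in_original_seq_alt aligned_indexes aligned_seq
instance (aligned_indexes : List Int) (aligned_seq : String) (out : List Int) : Decidable (Spec_indexes_in_original_seq aligned_indexes aligned_seq out) := by unfold Spec_indexes_in_original_seq; infer_instance

-- ===== CLAIM (what is proved, stated in full; the proofs are below) =====
def Claim_equal_indexes_in_original_seq : Prop := ∀ (aligned_indexes : List Int) (aligned_seq : String), Dom_indexes_in_original_seq aligned_indexes aligned_seq → Spec_indexes_in_original_seq aligned_indexes aligned_seq (indexes_in_original_seq aligned_indexes aligned_seq)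

-- ===== LEMMAS AND PROOFS =====

-- Int-valued count of gaps
def pvCg : List Char → Int
  | [] => 0
  | c :: rest => (if c = '-' then 1 else 0) + pvCg rest

-- closed form of A's inner loop
theorem pvAInner_eq : ∀ (cs : List Char) (pc ni idx : Int),
    pvAInner cs pc ni idx =
      if pc < idx ∧ idx ≤ pc + cs.length then
        some (ni - pvCg (cs.take (idx - pc).toNat))
      else none := by
  intro cs
  induction cs with
  | nil =>
    intro pc ni idx
    simp only [pvAInner, List.length_nil]
    rw [if_neg (by omega)]
  | cons c rest ih =>
    intro pc ni idx
    simp only [pvAInner]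
    by_cases h : pc + 1 = idx
    · have ht : (idx - pc).toNat = 1 := by omega
      rw [if_pos h,
        if_pos (show pc < idx ∧ idx ≤ pc + ((c :: rest).length : Int) by
          simp only [List.length_cons]; push_cast; omega)]
      simp only [ht, List.take_succ_cons, List.take_zero, pvCg]
      split <;> simp_all
    · rw [if_neg h, ih]
      by_cases h2 : pc + 1 < idx ∧ idx ≤ pc + 1 + (rest.length : Int)
      · rw [if_pos h2,
          if_pos (show pc < idx ∧ idx ≤ pc + ((c :: rest).length : Int) by
            simp only [List.length_cons]; push_cast; omega)]
        have ht : (idx - pc).toNat = (idx - (pc + 1)).toNat + 1 := by omega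
        simp only [ht, List.take_succ_cons, pvCg]
        split <;> (simp; try omega)
      · rw [if_neg h2,
          if_neg (show ¬ (pc < idx ∧ idx ≤ pc + ((c :: rest).length : Int)) by
            simp only [List.length_cons] at *; push_cast at *; omega)]

-- scanl prefix sums give the gap counts
theorem pvScanl_getD : ∀ (cs : List Char) (g : Int) (k : ℕ), k ≤ cs.length →
    (cs.scanl (fun g c => g + (if c = '-' then 1 else 0)) g).getD k 0 = g + pvCg (cs.take k) := by
  intro cs
  induction cs with
  | nil =>
    intro g k hk
    have hk0 : k = 0 := by simpa using hk
    subst hk0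
    simp [List.scanl_nil, pvCg]
  | cons c rest ih =>
    intro g k hk
    cases k with
    | zero => simp [List.scanl_cons, pvCg]
    | succ k =>
      rw [List.scanl_cons]
      simp only [List.getD_cons_succ, List.take_succ_cons, pvCg]
      rw [ih _ k (by simpa using hk)]
      ring

-- the per-index results agree
theorem pvStep_eq (cs : List Char) (i : Int) :
    pvAInner cs 0 i i =
      (if 1 ≤ i ∧ i ≤ (cs.length : Int) then
        some (i - (cs.scanl (fun g c => g + (if c = '-' then 1 else 0)) (0 : Int)).getD i.toNat 0)
      else none) := by
  rw [pvAInner_eq]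
  by_cases h : 1 ≤ i ∧ i ≤ (cs.length : Int)
  · rw [if_pos (by omega), if_pos h, pvScanl_getD cs 0 i.toNat (by omega)]
    simp only [Int.sub_zero, Int.zero_add]
  · rw [if_neg (by omega), if_neg h]

theorem pvFoldl_filterMap (cs : List Char) :
    ∀ (idxs : List Int) (acc : List Int),
    idxs.foldl
      (fun original_indexes index =>
        match pvAInner cs 0 index index with
        | some v => original_indexes ++ [v]
        | none => original_indexes) acc
    = acc ++ idxs.filterMap
        (fun i => if 1 ≤ i ∧ i ≤ (cs.length : Int) then
            some (i - (cs.scanl (fun g c => g + (if c = '-' then 1 else 0)) (0 : Int)).getD i.toNat 0)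
          else none) := by
  intro idxs
  induction idxs with
  | nil => intro acc; simp
  | cons i rest ih =>
    intro acc
    simp only [List.foldl_cons, List.filterMap_cons, pvStep_eq cs i]
    by_cases h : 1 ≤ i ∧ i ≤ (cs.length : Int)
    · rw [if_pos h, ih]; simp
    · rw [if_neg h, ih]

-- ===== VERDICT (by name: the statement is the Claim_ definition above) =====
theorem indexes_in_original_seq_spec : Claim_equal_indexes_in_original_seq := by
  intro idxs s _
  show _ = _
  unfold indexes_in_original_seq indexes_in_original_seq_alt
  rw [pvFoldl_filterMap s.toList idxs []]
  simp
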